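-- pv_equiv track=rewrite | github.com/nogibjj/news_sentiment_analysis | ngram.py | most_probable_words
-- ===== SOURCE A (Python) =====
-- def keys_with_highest_value(input_dict):  # DONE
--     """get the key(s) with highest value(s) from a dictionary"""
--     max_value = max(input_dict.values())
--     highest_keys = [key for key, value in input_dict.items() if value == max_value]
--     return highest_keys
--
-- def generate_n_grams(corpus, n):  # DONE i think
--     """function breaking up corpus into n-grams"""
--     n_gram_list = []
--     if len(corpus) < n:
--         return n_gram_list
--     for i in range(len(corpus) - n + 1):
--         n_gram = corpus[i : i + n]
--         n_gram_list.append(n_gram)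
--         pass
--     return n_gram_list
--
-- def relevant_n_grams(words, n, corpus):  # DONE I think
--     """function that returns all n-grams in corpus that start with words"""
--     all_grams = generate_n_grams(corpus, n)
--     wordsofinterest = words[1 - n :]
--     # get n-grams starting with words
--     matching_n_grams = [
--         n_gram for n_gram in all_grams if n_gram[: (n - 1)] == wordsofinterest
--     ]
--     return matching_n_grams
--
-- def create_dict(words, n, corpus):  # DONE I think
--     """creates a dictionary of all n-grams beginning with words"""
--     worddict = {}
--     # find all instances of words in corpus
--     relevant = relevant_n_grams(words, n, corpus)
--     # create dictionary of the following word as key and number of occurances as value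
--     if relevant == []:
--         return worddict
--     else:
--         for n_gram in relevant:
--             currkey = n_gram[-1]
--             if currkey in worddict.keys():
--                 worddict[currkey] += 1
--             else:
--                 worddict[currkey] = 1
--     return worddict
--
-- def most_probable_words(words, corpus):  # NOTDONE
--     """creates a list of the equally most probable words, including backoff"""
--     new_words = []
--     n = len(words) + 1
--     while new_words == []:
--         if n == 1:
--             words = []
--         else:
--             pass
--         worddict = create_dict(words, n, corpus)
--         if len(worddict) > 0:
--             # append all the equally most probable words
--             Keymax = keys_with_highest_value(worddict)
--             new_words = Keymax
--         else:
--             # do stupid backoff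
--             n = n - 1
--     return new_words
-- ===== SOURCE B (Python) =====
-- def most_probable_words(words, corpus):
--     """creates a list of the equally most probable words, including backoff:
--     one corpus pass computes, at each position, the length of the longest
--     context match with the query (a level-l match implies all lower levels
--     match), filling one next-word counter per backoff level; the backoff then
--     just picks the first nonempty counter."""
--     maxlen = len(words)
--     counters = [{} for _ in range(maxlen + 1)]
--     for j, w in enumerate(corpus):
--         l = 0
--         while l < j and l < maxlen and corpus[j - 1 - l] == words[maxlen - 1 - l]:
--             l += 1
--         for t in range(l + 1):
--             bucket = counters[t]
--             bucket[w] = bucket.get(w, 0) + 1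
--     for n in range(maxlen + 1, 0, -1):
--         counts = counters[n - 1]
--         if counts:
--             m = max(counts.values())
--             return [k for k, v in counts.items() if v == m]
--     return []
-- ===== Notes on version B (the rewrite author's own statement) =====
-- stated objective: faster
-- what changed: Instead of rebuilding, filtering and counting the full n-gram list at every backoff level, B makes one corpus pass that computes at each position the longest context match with the query (a level-l match implies all lower-level matches) and fills one next-word counter per level, so the backoff is just picking the first nonempty counter.
import Mathlib
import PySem

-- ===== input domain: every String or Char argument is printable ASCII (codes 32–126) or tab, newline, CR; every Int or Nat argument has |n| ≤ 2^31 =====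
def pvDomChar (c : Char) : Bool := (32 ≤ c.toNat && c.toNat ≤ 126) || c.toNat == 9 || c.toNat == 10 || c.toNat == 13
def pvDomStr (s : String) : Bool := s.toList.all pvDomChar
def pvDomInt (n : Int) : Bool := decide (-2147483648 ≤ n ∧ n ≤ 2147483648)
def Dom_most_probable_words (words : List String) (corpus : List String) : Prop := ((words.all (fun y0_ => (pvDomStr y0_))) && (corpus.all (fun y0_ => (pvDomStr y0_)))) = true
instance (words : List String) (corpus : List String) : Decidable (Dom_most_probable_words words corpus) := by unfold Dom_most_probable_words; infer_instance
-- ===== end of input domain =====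

-- B replaces A's per-backoff-level build/filter/count helper pipeline by ONE corpus pass
-- that computes at each position the longest context match with the query (a level-l match
-- implies all lower-level matches) and fills one next-word counter per backoff level; the
-- backoff then just picks the first nonempty counter (objective: faster, measured).
-- Pre_ excludes the empty corpus, on which the Python A raises IndexError via [][-1].

-- ===== PORT A =====
def keys_with_highest_value (input_dict : PySem.Dict String Int) : List String :=
  -- max(input_dict.values()): callers guard len > 0; default 0 is never used under that guard
  let max_value := (PySem.List.max? input_dict.values (fun v => v)).getD 0
  (input_dict.items.filter (fun p => p.2 == max_value)).map (fun p => p.1)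

def generate_n_grams (corpus : List String) (n : Int) : List (List String) :=
  if PySem.List.len corpus < n then []
  else
    (PySem.List.pyRange 0 (PySem.List.len corpus - n + 1) 1).foldl
      (fun acc i => acc ++ [PySem.List.slice corpus (some i) (some (i + n))]) []

def relevant_n_grams (words : List String) (n : Int) (corpus : List String) : List (List String) :=
  let all_grams := generate_n_grams corpus n
  let wordsofinterest := PySem.List.slice words (some (1 - n)) none
  all_grams.filter (fun n_gram => PySem.List.slice n_gram none (some (n - 1)) == wordsofinterest)

def create_dict (words : List String) (n : Int) (corpus : List String) : PySem.Dict String Int :=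
  let relevant := relevant_n_grams words n corpus
  if relevant == [] then PySem.Dict.empty
  else
    relevant.foldl
      (fun worddict n_gram =>
        -- n_gram[-1]: IndexError only on the empty n-gram, reached only at n = 0, i.e. corpus = [] (outside Pre_)
        let currkey := PySem.List.pyGetD n_gram (-1) ""
        if worddict.contains currkey then worddict.insert currkey (worddict.getD currkey 0 + 1)
        else worddict.insert currkey 1)
      PySem.Dict.empty

-- the while loop: n goes len(words)+1, len(words), …; fuel = current n (at n = 0 Python raises, outside Pre_)
def mpwLoop (words corpus : List String) : Nat → List String
  | 0 => []
  | (k+1) =>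
    let words' := if k + 1 = 1 then [] else words
    let worddict := create_dict words' ((k : Int) + 1) corpus
    if worddict.size > 0 then keys_with_highest_value worddict
    else mpwLoop words' corpus k

def most_probable_words (words : List String) (corpus : List String) : List String :=
  mpwLoop words corpus (words.length + 1)

-- ===== PORT B =====
-- the while loop: longest l with l < j, l < maxlen and corpus[j-1-l] == words[maxlen-1-l];
-- fuel = maxlen.toNat + 1 bounds the iterations (each step needs l < maxlen), so it never runs out
def altMatch (words corpus : List String) (maxlen j : Int) : Nat → Int → Int
  | 0, l => l
  | (f+1), l =>
    if l < j ∧ l < maxlen ∧ (PySem.List.pyGetD corpus (j - 1 - l) "" == PySem.List.pyGetD words (maxlen - 1 - l) "") = true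
    then altMatch words corpus maxlen j f (l + 1)
    else l

-- for t in range(l + 1): counters[t][w] = counters[t].get(w, 0) + 1   (t is in range: t ≤ l ≤ maxlen < len(counters))
def altBump (cs : List (PySem.Dict String Int)) (w : String) (l : Int) : List (PySem.Dict String Int) :=
  (PySem.List.pyRange 0 (l + 1) 1).foldl
    (fun cs t =>
      let bucket := cs.getD t.toNat PySem.Dict.empty
      cs.set t.toNat (bucket.insert w (bucket.getD w 0 + 1)))
    cs

def altCounters (words corpus : List String) (maxlen : Int) : List (PySem.Dict String Int) :=
  (PySem.List.enumerate corpus).foldl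
    (fun cs jw => altBump cs jw.2 (altMatch words corpus maxlen jw.1 (maxlen.toNat + 1) 0))
    (List.replicate (maxlen.toNat + 1) PySem.Dict.empty)

-- for n in range(maxlen+1, 0, -1): counts = counters[n-1]; …   (fuel = current n; falls through to [])
def altLookup (cs : List (PySem.Dict String Int)) : Nat → List String
  | 0 => []
  | (k+1) =>
    let counts := cs.getD k PySem.Dict.empty
    if counts.size > 0 then
      let m := (PySem.List.max? counts.values (fun v => v)).getD 0
      (counts.items.filter (fun p => p.2 == m)).map (fun p => p.1)
    else altLookup cs k

def most_probable_words_alt (words : List String) (corpus : List String) : List String :=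
  altLookup (altCounters words corpus (PySem.List.len words)) (words.length + 1)

-- ===== PRECONDITION & SPEC =====
-- excludes exactly the empty corpus, on which Python A raises IndexError ([][-1]) after backoff reaches n = 0
def Pre_most_probable_words (words : List String) (corpus : List String) : Prop := corpus ≠ []
instance (words : List String) (corpus : List String) : Decidable (Pre_most_probable_words words corpus) := by unfold Pre_most_probable_words; infer_instance
def pvWitness_most_probable_words : List String × List String := (["a"], ["a", "b", "a", "c"])

def Spec_most_probable_words (words : List String) (corpus : List String) (out : List String) : Prop := out = most_probable_words_alt words corpus
instance (words : List String) (corpus : List String) (out : List String) : Decidable (Spec_most_probable_words words corpus out) := by unfold Spec_most_probable_words; infer_instance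

-- ===== CLAIM (what is proved, stated in full; the proofs are below) =====
def Claim_equal_most_probable_words : Prop := ∀ (words : List String) (corpus : List String), Dom_most_probable_words words corpus → Pre_most_probable_words words corpus → Spec_most_probable_words words corpus (most_probable_words words corpus)

-- ===== LEMMAS AND PROOFS =====

-- PROOF-ONLY middle form: one conditional counting scan of the corpus at level n (i-indexed)
def bScan (pfx : List String) (corpus : List String) (n : Int) : PySem.Dict String Int :=
  (PySem.List.pyRange 0 (PySem.List.len corpus - n + 1) 1).foldl
    (fun counts i =>
      if PySem.List.slice corpus (some i) (some (i + n - 1)) == pfx then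
        let w := PySem.List.pyGetD corpus (i + n - 1) ""
        counts.insert w (counts.getD w 0 + 1)
      else counts)
    PySem.Dict.empty

-- PROOF-ONLY middle form: the same count, j-indexed over next-word positions
def scanJ (pfx : List String) (corpus : List String) (k : Nat) : PySem.Dict String Int :=
  (PySem.List.pyRange 0 (PySem.List.len corpus) 1).foldl
    (fun b j =>
      if (k : Int) ≤ j ∧ PySem.List.slice corpus (some (j - (k : Int))) (some j) = pfx then
        let w := PySem.List.pyGetD corpus j ""
        b.insert w (b.getD w 0 + 1)
      else b)
    PySem.Dict.empty

-- ---- A-side: create_dict is the i-indexed conditional scan (as in the helper pipeline) ----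

theorem gen_eq_map (corpus : List String) (n : Int) :
    generate_n_grams corpus n
      = (PySem.List.pyRange 0 (PySem.List.len corpus - n + 1) 1).map
          (fun i => PySem.List.slice corpus (some i) (some (i + n))) := by
  unfold generate_n_grams
  split_ifs with h
  · rw [PySem.List.pyRange_one_eq_nil (by simp [PySem.List.len_eq] at h ⊢; omega)]
    simp
  · rw [PySem.List.foldl_append_singleton_eq_map]
    simp

theorem slice_gram (j k : Nat) (corpus : List String) :
    PySem.List.slice corpus (some (j:Int)) (some ((j:Int) + ((k:Int)+1)))
      = (corpus.drop j).take (k+1) := by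
  have : (j:Int) + ((k:Int)+1) = ((j + (k+1) : Nat) : Int) := by push_cast; ring
  rw [this, PySem.List.slice_natCast]
  congr 1
  omega

theorem last_gram (j k : Nat) (corpus : List String) (h : j + k < corpus.length) :
    PySem.List.pyGetD ((corpus.drop j).take (k+1)) (-1) "" = corpus.getD (j+k) "" := by
  have hlen : ((corpus.drop j).take (k+1)).length = k+1 := by simp; omega
  rw [PySem.List.pyGetD_neg_ofNat _ 1 "" (by omega) (by simp [hlen])]
  rw [List.getD_eq_getElem _ _ (by omega)]
  simp [hlen]

theorem create_dict_eq_bScan (words corpus : List String) (k : Nat) :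
    create_dict words ((k : Int) + 1) corpus
      = bScan (PySem.List.slice words (some (1 - ((k : Int) + 1))) none) corpus ((k : Int) + 1) := by
  unfold create_dict relevant_n_grams bScan
  rw [gen_eq_map]
  set n : Int := (k : Int) + 1 with hn
  set pfx := PySem.List.slice words (some (1 - n)) none with hpfx
  set rel := ((PySem.List.pyRange 0 (PySem.List.len corpus - n + 1) 1).map
      (fun i => PySem.List.slice corpus (some i) (some (i + n)))).filter
      (fun n_gram => PySem.List.slice n_gram none (some (n - 1)) == pfx) with hrel
  have hguard : (if rel == [] then (PySem.Dict.empty : PySem.Dict String Int)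
      else rel.foldl
        (fun worddict n_gram =>
          let currkey := PySem.List.pyGetD n_gram (-1) ""
          if worddict.contains currkey then worddict.insert currkey (worddict.getD currkey 0 + 1)
          else worddict.insert currkey 1) PySem.Dict.empty)
      = rel.foldl
        (fun worddict n_gram =>
          let currkey := PySem.List.pyGetD n_gram (-1) ""
          if worddict.contains currkey then worddict.insert currkey (worddict.getD currkey 0 + 1)
          else worddict.insert currkey 1) PySem.Dict.empty := by
    split_ifs with h
    · rw [show rel = [] from by simpa using h]
      rfl
    · rfl
  rw [hguard, ← PySem.List.foldl_if_eq_foldl_filter, List.foldl_map]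
  refine PySem.List.foldl_congr_mem _ _ _ _ ?_
  intro d i hi
  rw [PySem.List.mem_pyRange_one] at hi
  obtain ⟨j, rfl⟩ : ∃ j : Nat, i = (j : Int) := ⟨i.toNat, (Int.toNat_of_nonneg hi.1).symm⟩
  have hjk : j + k < corpus.length := by
    have := hi.2
    simp [PySem.List.len_eq, hn] at this
    omega
  have hidx : (j:Int) + n - 1 = ((j + k : Nat) : Int) := by rw [hn]; push_cast; ring
  have hcond : PySem.List.slice (PySem.List.slice corpus (some (j:Int)) (some ((j:Int) + n))) none (some (n - 1))
      = PySem.List.slice corpus (some (j:Int)) (some ((j:Int) + n - 1)) := by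
    rw [hn, slice_gram, hidx, PySem.List.slice_natCast,
        show ((k:Int) + 1 - 1) = ((k : Nat) : Int) from by push_cast; ring,
        PySem.List.slice_to_natCast, List.take_take]
    congr 1
    omega
  have hidx' : (j:Int) + ((k:Int)+1) - 1 = ((j+k : Nat) : Int) := by push_cast; ring
  have hkey : PySem.List.pyGetD (PySem.List.slice corpus (some (j:Int)) (some ((j:Int) + n))) (-1) ""
      = PySem.List.pyGetD corpus ((j:Int) + n - 1) "" := by
    rw [hn, slice_gram, last_gram j k corpus hjk, hidx', PySem.List.pyGetD_natCast]
  rw [hcond, hkey]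
  split_ifs with hc
  · by_cases hcont : d.contains (PySem.List.pyGetD corpus ((j:Int) + n - 1) "") = true
    · simp [hcont]
    · have h0 : d.getD (PySem.List.pyGetD corpus ((j:Int) + n - 1) "") 0 = 0 := by
        apply PySem.Dict.getD_of_not_contains
        simpa using hcont
      simp [hcont, h0]
  · rfl

-- ---- general shift lemma for ranges (no library lemma found) ----
theorem pyRange_shift (m : Nat) (a : Int) :
    PySem.List.pyRange a (a + (m : Int)) 1 = (PySem.List.pyRange 0 (m : Int) 1).map (a + ·) := by
  induction m with
  | zero => simp [PySem.List.pyRange_one_eq_nil]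
  | succ m ih =>
    rw [show ((m+1 : Nat) : Int) = (m : Int) + 1 from by push_cast; ring,
        ← add_assoc,
        PySem.List.pyRange_one_succ_right (by omega),
        PySem.List.pyRange_one_succ_right (by omega),
        List.map_append, ih]
    simp

-- ---- reindexing: the j-indexed scan is the i-indexed scan at level k+1 ----
theorem scanJ_eq_bScan (corpus pfx : List String) (k : Nat) (hk : pfx.length = k) :
    scanJ pfx corpus k = bScan pfx corpus ((k : Int) + 1) := by
  unfold scanJ bScan
  have hlen : PySem.List.len corpus = (corpus.length : Int) := by simp [PySem.List.len_eq]
  have hend : PySem.List.len corpus - ((k : Int) + 1) + 1 = PySem.List.len corpus - (k : Int) := by ring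
  rw [hend]
  by_cases hkle : (k : Int) ≤ PySem.List.len corpus
  · -- split the j-range at k
    rw [show PySem.List.pyRange 0 (PySem.List.len corpus) 1
          = PySem.List.pyRange 0 (k : Int) 1 ++ PySem.List.pyRange (k : Int) (PySem.List.len corpus) 1
        from PySem.List.pyRange_one_append 0 (k : Int) (PySem.List.len corpus) (by omega) hkle,
      List.foldl_append]
    -- the first chunk does nothing (guard k ≤ j fails)
    have hfirst : ∀ (init : PySem.Dict String Int),
        (PySem.List.pyRange 0 (k : Int) 1).foldl
          (fun b j =>
            if (k : Int) ≤ j ∧ PySem.List.slice corpus (some (j - (k : Int))) (some j) = pfx then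
              b.insert (PySem.List.pyGetD corpus j "") (b.getD (PySem.List.pyGetD corpus j "") 0 + 1)
            else b) init = init := by
      intro init
      rw [PySem.List.foldl_congr_mem _ _ (fun b _ => b) init ?_]
      · exact List.foldl_fixed _
      · intro b j hj
        rw [PySem.List.mem_pyRange_one] at hj
        rw [if_neg (by intro h; omega)]
    rw [hfirst]
    -- shift the second chunk to start at 0
    have hm : PySem.List.len corpus - (k : Int) = ((corpus.length - k : Nat) : Int) := by
      rw [hlen] at hkle ⊢; push_cast; omega
    have hshift : PySem.List.pyRange (k : Int) (PySem.List.len corpus) 1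
        = (PySem.List.pyRange 0 ((corpus.length - k : Nat) : Int) 1).map ((k : Int) + ·) := by
      rw [← pyRange_shift (corpus.length - k) (k : Int)]
      congr 1
      rw [hlen]; push_cast; omega
    rw [hshift, List.foldl_map, hm]
    refine PySem.List.foldl_congr_mem _ _ _ _ ?_
    intro b i hi
    rw [PySem.List.mem_pyRange_one] at hi
    have h1 : (k : Int) + i - (k : Int) = i := by ring
    have h2 : (k : Int) + i = i + ((k : Int) + 1) - 1 := by ring
    have h3 : ((k : Int) ≤ (k : Int) + i) := by omega
    rw [h1]
    by_cases hmatch : PySem.List.slice corpus (some i) (some ((k : Int) + i)) = pfx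
    · rw [if_pos ⟨h3, hmatch⟩, if_pos (by rw [← h2]; simpa using hmatch), ← h2]
    · rw [if_neg (by intro h; exact hmatch h.2), if_neg (by rw [← h2]; simpa using hmatch)]
  · -- k > len corpus: both scans are empty
    rw [PySem.List.pyRange_one_eq_nil (by omega : PySem.List.len corpus - (k : Int) ≤ 0)]
    simp only [List.foldl_nil]
    rw [PySem.List.foldl_congr_mem _ _ (fun b _ => b) _ ?_]
    · exact List.foldl_fixed _
    · intro b j hj
      rw [PySem.List.mem_pyRange_one] at hj
      rw [if_neg (by intro h; omega)]

-- ---- the while loop: bounds and its characterisation as longest elementwise context match ----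
theorem altMatch_ge (words corpus : List String) (maxlen j : Int) :
    ∀ (fuel : Nat) (l : Int), l ≤ altMatch words corpus maxlen j fuel l := by
  intro fuel
  induction fuel with
  | zero => intro l; simp [altMatch]
  | succ f ih =>
    intro l
    simp only [altMatch]
    split_ifs with h
    · exact le_trans (by omega) (ih (l + 1))
    · exact le_refl l

theorem altMatch_le (words corpus : List String) (maxlen j : Int) :
    ∀ (fuel : Nat) (l : Int), l ≤ maxlen → altMatch words corpus maxlen j fuel l ≤ maxlen := by
  intro fuel
  induction fuel with
  | zero => intro l hl; simpa [altMatch] using hl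
  | succ f ih =>
    intro l hl
    simp only [altMatch]
    split_ifs with h
    · exact ih (l + 1) (by omega)
    · exact hl

theorem altMatch_guards (words corpus : List String) (maxlen j : Int) :
    ∀ (fuel : Nat) (l s : Int), l ≤ s → s < altMatch words corpus maxlen j fuel l →
      s < j ∧ s < maxlen ∧
        (PySem.List.pyGetD corpus (j - 1 - s) "" == PySem.List.pyGetD words (maxlen - 1 - s) "") = true := by
  intro fuel
  induction fuel with
  | zero => intro l s hls hs; simp [altMatch] at hs; omega
  | succ f ih =>
    intro l s hls hs
    simp only [altMatch] at hs
    split_ifs at hs with h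
    · by_cases hsl : s = l
      · subst hsl; exact h
      · exact ih (l + 1) s (by omega) hs
    · omega

theorem altMatch_stop (words corpus : List String) (maxlen j : Int) :
    ∀ (fuel : Nat) (l : Int), maxlen < l + fuel →
      ¬ (altMatch words corpus maxlen j fuel l < j ∧ altMatch words corpus maxlen j fuel l < maxlen ∧
          (PySem.List.pyGetD corpus (j - 1 - altMatch words corpus maxlen j fuel l) ""
            == PySem.List.pyGetD words (maxlen - 1 - altMatch words corpus maxlen j fuel l) "") = true) := by
  intro fuel
  induction fuel with
  | zero =>
    intro l hfl
    simp only [altMatch]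
    rintro ⟨-, h2, -⟩
    omega
  | succ f ih =>
    intro l hfl
    simp only [altMatch]
    split_ifs with h
    · exact ih (l + 1) (by push_cast at hfl ⊢; omega)
    · exact fun hh => h hh

-- ---- elementwise form of the level-k context match condition ----
theorem slice_eq_iff_elem (words corpus : List String) (j : Int) (k : Nat)
    (hj0 : 0 ≤ j) (hjlt : j < (corpus.length : Int)) (hkj : (k : Int) ≤ j) (hkw : k ≤ words.length) :
    (PySem.List.slice corpus (some (j - (k : Int))) (some j) = words.drop (words.length - k))
      ↔ (∀ s : Nat, s < k →
          PySem.List.pyGetD corpus (j - 1 - (s : Int)) ""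
            = PySem.List.pyGetD words (((words.length : Int)) - 1 - (s : Int)) "") := by
  rw [PySem.List.slice_toNat corpus (by omega : (0:Int) ≤ j - (k : Int)) (by omega : (0:Int) ≤ j)]
  have hjn : j.toNat < corpus.length := by omega
  have hd : (j - (k : Int)).toNat = j.toNat - k := by omega
  rw [hd]
  constructor
  · intro heq s hs
    have hidx : PySem.List.pyGetD corpus (j - 1 - (s : Int)) ""
        = (List.take (j.toNat - (j.toNat - k)) (List.drop (j.toNat - k) corpus)).getD (k - 1 - s) "" := by
      rw [PySem.List.pyGetD_eq_getElem corpus "" (by omega) (by omega)]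
      rw [List.getD_eq_getElem _ _ (by simp; omega)]
      simp only [List.getElem_take, List.getElem_drop]
      congr 1
      omega
    have hidx2 : PySem.List.pyGetD words (((words.length : Int)) - 1 - (s : Int)) ""
        = (words.drop (words.length - k)).getD (k - 1 - s) "" := by
      rw [PySem.List.pyGetD_eq_getElem words "" (by omega) (by omega)]
      rw [List.getD_eq_getElem _ _ (by simp; omega)]
      simp only [List.getElem_drop]
      congr 1
      omega
    rw [hidx, hidx2, heq]
  · intro helem
    apply List.ext_getElem
    · simp
      omega
    · intro i h1 h2
      have hi : i < k := by simp at h1; omega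
      have e1 : (List.take (j.toNat - (j.toNat - k)) (List.drop (j.toNat - k) corpus))[i]'h1
          = PySem.List.pyGetD corpus (j - 1 - ((k - 1 - i : Nat) : Int)) "" := by
        rw [PySem.List.pyGetD_eq_getElem corpus "" (by push_cast; omega) (by push_cast; omega)]
        simp only [List.getElem_take, List.getElem_drop]
        congr 1
        push_cast
        omega
      have e2 : (words.drop (words.length - k))[i]'h2
          = PySem.List.pyGetD words (((words.length : Int)) - 1 - ((k - 1 - i : Nat) : Int)) "" := by
        rw [PySem.List.pyGetD_eq_getElem words "" (by push_cast; omega) (by push_cast; omega)]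
        simp only [List.getElem_drop]
        congr 1
        push_cast
        omega
      rw [e1, e2, helem (k - 1 - i) (by omega)]

-- ---- the match length reached by the while loop decides exactly the level-k condition ----
theorem match_iff (words corpus : List String) (j : Int) (k : Nat)
    (hj0 : 0 ≤ j) (hjlt : j < (corpus.length : Int)) (hkw : k ≤ words.length) :
    ((k : Int) ≤ altMatch words corpus ((words.length : Int)) j (words.length + 1) 0)
      ↔ ((k : Int) ≤ j ∧
          PySem.List.slice corpus (some (j - (k : Int))) (some j) = words.drop (words.length - k)) := by
  set L := altMatch words corpus ((words.length : Int)) j (words.length + 1) 0 with hL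
  constructor
  · intro hkL
    have hkj : (k : Int) ≤ j := by
      rcases Nat.eq_zero_or_pos k with hk0 | hk0
      · omega
      · have := altMatch_guards words corpus ((words.length : Int)) j (words.length + 1) 0
          ((k : Int) - 1) (by omega) (by omega)
        omega
    refine ⟨hkj, ?_⟩
    rw [slice_eq_iff_elem words corpus j k hj0 hjlt hkj hkw]
    intro s hs
    have hg := altMatch_guards words corpus ((words.length : Int)) j (words.length + 1) 0
      (s : Int) (by omega) (by omega)
    have := hg.2.2
    simpa using this
  · rintro ⟨hkj, heq⟩
    by_contra hlt
    push_neg at hlt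
    have hL0 : (0 : Int) ≤ L := altMatch_ge words corpus ((words.length : Int)) j (words.length + 1) 0
    have hstop := altMatch_stop words corpus ((words.length : Int)) j (words.length + 1) 0
      (by push_cast; omega)
    rw [← hL] at hstop
    apply hstop
    refine ⟨by omega, by push_cast; omega, ?_⟩
    rw [slice_eq_iff_elem words corpus j k hj0 hjlt hkj hkw] at heq
    have := heq L.toNat (by omega)
    rw [show ((L.toNat : Nat) : Int) = L from by omega] at this
    simpa using this

-- ---- the per-position counter update, seen from one level k ----
theorem foldl_set_length (l : List Int) (cs : List (PySem.Dict String Int))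
    (f : List (PySem.Dict String Int) → Int → PySem.Dict String Int) :
    (l.foldl (fun cs t => cs.set t.toNat (f cs t)) cs).length = cs.length := by
  induction l generalizing cs with
  | nil => rfl
  | cons t l ih => simp [ih]

theorem bump_aux (cs : List (PySem.Dict String Int)) (w : String) (k : Nat) :
    ∀ (m : Nat), m ≤ cs.length →
      (((PySem.List.pyRange 0 (m : Int) 1).foldl
          (fun cs t =>
            cs.set t.toNat ((cs.getD t.toNat PySem.Dict.empty).insert w
              ((cs.getD t.toNat PySem.Dict.empty).getD w 0 + 1)))
          cs).getD k PySem.Dict.empty)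
        = if k < m then
            (cs.getD k PySem.Dict.empty).insert w ((cs.getD k PySem.Dict.empty).getD w 0 + 1)
          else cs.getD k PySem.Dict.empty := by
  intro m
  induction m with
  | zero =>
    intro _
    rw [PySem.List.pyRange_one_eq_nil (by omega)]
    simp
  | succ m ih =>
    intro hm
    rw [show ((m+1 : Nat) : Int) = (m : Int) + 1 from by push_cast; ring,
        PySem.List.pyRange_one_succ_right (by omega), List.foldl_append]
    simp only [List.foldl_cons, List.foldl_nil, Int.toNat_natCast]
    set F := (PySem.List.pyRange 0 (m : Int) 1).foldl
        (fun cs t =>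
          cs.set t.toNat ((cs.getD t.toNat PySem.Dict.empty).insert w
            ((cs.getD t.toNat PySem.Dict.empty).getD w 0 + 1)))
        cs with hF
    have hFlen : F.length = cs.length := foldl_set_length _ _ _
    have hgetset : ∀ (x : PySem.Dict String Int),
        (F.set m x).getD k PySem.Dict.empty = if k = m then x else F.getD k PySem.Dict.empty := by
      intro x
      by_cases hkm : k = m
      · subst hkm
        rw [if_pos rfl]
        have : k < F.length := by omega
        simp [List.getD, List.getElem?_set, this]
      · rw [if_neg hkm]
        simp [List.getD, List.getElem?_set, Ne.symm hkm]
    rw [hgetset]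
    by_cases hkm : k = m
    · subst hkm
      rw [if_pos rfl, ih (by omega), if_neg (by omega), if_pos (by omega)]
    · rw [if_neg hkm, ih (by omega)]
      by_cases hklt : k < m
      · rw [if_pos hklt, if_pos (by omega)]
      · rw [if_neg hklt, if_neg (by omega)]

theorem bump_getD (cs : List (PySem.Dict String Int)) (w : String) (L : Int)
    (hL0 : 0 ≤ L) (hLlen : L < (cs.length : Int)) (k : Nat) :
    (altBump cs w L).getD k PySem.Dict.empty
      = if (k : Int) ≤ L then
          (cs.getD k PySem.Dict.empty).insert w ((cs.getD k PySem.Dict.empty).getD w 0 + 1)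
        else cs.getD k PySem.Dict.empty := by
  unfold altBump
  rw [show L + 1 = ((L.toNat + 1 : Nat) : Int) from by omega]
  rw [bump_aux cs w k (L.toNat + 1) (by omega)]
  by_cases h : (k : Int) ≤ L
  · rw [if_pos (by omega), if_pos h]
  · rw [if_neg (by omega), if_neg h]

-- ---- the whole counter-building pass, seen from one level k ----
theorem counters_getD (words corpus : List String) (k : Nat) (hkw : k ≤ words.length) :
    (altCounters words corpus (PySem.List.len words)).getD k PySem.Dict.empty
      = scanJ (words.drop (words.length - k)) corpus k := by
  unfold altCounters scanJ
  have hml : PySem.List.len words = (words.length : Int) := by simp [PySem.List.len_eq]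
  have hmt : (PySem.List.len words).toNat = words.length := by rw [hml]; omega
  rw [PySem.List.enumerate_eq_map_pyRange corpus "", List.foldl_map, hmt]
  have main : ∀ (js : List Int), (∀ j ∈ js, 0 ≤ j ∧ j < PySem.List.len corpus) →
      ∀ (cs : List (PySem.Dict String Int)), cs.length = words.length + 1 →
      ((js.foldl
          (fun cs j => altBump cs (PySem.List.pyGetD corpus j "")
            (altMatch words corpus (PySem.List.len words) j (words.length + 1) 0))
          cs).getD k PySem.Dict.empty)
        = js.foldl
            (fun b j =>
              if (k : Int) ≤ j ∧ PySem.List.slice corpus (some (j - (k : Int))) (some j)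
                  = words.drop (words.length - k) then
                b.insert (PySem.List.pyGetD corpus j "")
                  (b.getD (PySem.List.pyGetD corpus j "") 0 + 1)
              else b)
            (cs.getD k PySem.Dict.empty) := by
    intro js
    induction js with
    | nil => intro _ cs _; rfl
    | cons j js ih =>
      intro hjs cs hlen
      obtain ⟨hj0, hjlt⟩ := hjs j (by simp)
      have hjlt' : j < (corpus.length : Int) := by simpa [PySem.List.len_eq] using hjlt
      simp only [List.foldl_cons]
      have hL0 : (0 : Int) ≤ altMatch words corpus (PySem.List.len words) j (words.length + 1) 0 :=
        altMatch_ge words corpus (PySem.List.len words) j (words.length + 1) 0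
      have hLle : altMatch words corpus (PySem.List.len words) j (words.length + 1) 0
          ≤ PySem.List.len words :=
        altMatch_le words corpus (PySem.List.len words) j (words.length + 1) 0 (by rw [hml]; omega)
      rw [ih (fun j' hj' => hjs j' (by simp [hj'])) _
            (by rw [show (altBump cs (PySem.List.pyGetD corpus j "")
                (altMatch words corpus (PySem.List.len words) j (words.length + 1) 0)).length
                  = cs.length from foldl_set_length _ _ _]; exact hlen)]
      congr 1
      rw [bump_getD cs (PySem.List.pyGetD corpus j "")
            (altMatch words corpus (PySem.List.len words) j (words.length + 1) 0)
            hL0 (by rw [hlen]; push_cast; omega) k]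
      have hiff := match_iff words corpus j k hj0 hjlt' hkw
      rw [hml] at *
      by_cases hc : (k : Int) ≤ j ∧ PySem.List.slice corpus (some (j - (k : Int))) (some j)
          = words.drop (words.length - k)
      · rw [if_pos (hiff.mpr hc), if_pos hc]
      · rw [if_neg (fun h => hc (hiff.mp h)), if_neg hc]
  rw [show (fun (x : List (PySem.Dict String Int)) (y : Int) =>
        altBump x ((y, PySem.List.pyGetD corpus y "")).2
          (altMatch words corpus (PySem.List.len words) ((y, PySem.List.pyGetD corpus y "")).1
            (words.length + 1) 0))
      = (fun cs j => altBump cs (PySem.List.pyGetD corpus j "")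
          (altMatch words corpus (PySem.List.len words) j (words.length + 1) 0)) from rfl]
  rw [main (PySem.List.pyRange 0 (PySem.List.len corpus) 1)
        (fun j hj => by rw [PySem.List.mem_pyRange_one] at hj; exact hj)
        (List.replicate (words.length + 1) PySem.Dict.empty)
        (by simp)]
  have hrep : (List.replicate (words.length + 1) (PySem.Dict.empty : PySem.Dict String Int)).getD
      k PySem.Dict.empty = PySem.Dict.empty := by
    simp [List.getD, List.getElem?_replicate]
    split_ifs <;> rfl
  rw [hrep]

-- ---- the prefix used by A at level k+1 (k ≥ 1) is the last k words ----
theorem pfx_eq (words : List String) (k : Nat) (hk1 : 1 ≤ k) :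
    PySem.List.slice words (some (1 - ((k : Int) + 1))) none = words.drop (words.length - k) := by
  rw [show (1 - ((k : Int) + 1)) = -((k : Nat) : Int) from by push_cast; ring,
      PySem.List.slice_from_neg_natCast _ _ (by omega)]

-- ---- the two loops agree level by level ----
theorem loop_eq (corpus : List String) :
    ∀ (fuel : Nat) (words : List String), fuel ≤ words.length + 1 →
      mpwLoop words corpus fuel = altLookup (altCounters words corpus (PySem.List.len words)) fuel := by
  intro fuel
  induction fuel with
  | zero => intro words _; rfl
  | succ k ih =>
    intro words h1
    simp only [mpwLoop, altLookup]
    have hd : create_dict (if k + 1 = 1 then [] else words) ((k : Int) + 1) corpus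
        = (altCounters words corpus (PySem.List.len words)).getD k PySem.Dict.empty := by
      rw [counters_getD words corpus k (by omega)]
      by_cases hk0 : k = 0
      · subst hk0
        rw [if_pos rfl, create_dict_eq_bScan [] corpus 0]
        have e : PySem.List.slice ([] : List String) (some (1 - (((0 : Nat) : Int) + 1))) none
            = ([] : List String) := by decide
        have e2 : words.drop (words.length - 0) = [] := by simp
        rw [e, e2, scanJ_eq_bScan corpus [] 0 rfl]
      · rw [if_neg (by omega), create_dict_eq_bScan words corpus k,
            pfx_eq words k (by omega),
            ← scanJ_eq_bScan corpus (words.drop (words.length - k)) k (by simp; omega)]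
    rw [hd]
    by_cases hk0 : k = 0
    · subst hk0
      split_ifs with hs
      · simp [keys_with_highest_value]
      · rfl
      · rfl
    · rw [show (if k + 1 = 1 then ([] : List String) else words) = words from if_neg (by omega)]
      split_ifs with hs
      · simp [keys_with_highest_value]
      · exact ih words (by omega)

-- ===== VERDICT (by name: the statement is the Claim_ definition above) =====
theorem most_probable_words_spec : Claim_equal_most_probable_words := by
  intro words corpus _ _
  unfold Spec_most_probable_words most_probable_words most_probable_words_alt
  exact loop_eq corpus (words.length + 1) words le_rfl
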